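-- pv_equiv track=rewrite | github.com/wilmurillo-ai/Design-Assistant | .skills/openclaw-skills/skills/guitenbay/code-review-for-gitcode/scripts/review_pr.py | extract_file_diff
-- ===== SOURCE A (Python) =====
-- def extract_file_diff(diff_content: str, target_file: str) -> str:
--     """Extract diff for a specific file from the full diff."""
--     if not diff_content:
--         return ''
--
--     lines = diff_content.split('\n')
--     result = []
--     in_target_file = False
--
--     for line in lines:
--         if line.startswith('diff --git'):
--             # Check if we're entering the target file
--             in_target_file = target_file in line
--             if in_target_file:
--                 result.append(line)
--         elif in_target_file:
--             result.append(line)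
--             # Check if we're at the end of this file's diff
--             if line.startswith('diff --git'):
--                 break
--
--     return '\n'.join(result)
-- ===== SOURCE B (Python) =====
-- def _blocks(lines):
--     """Group lines into per-file diff sections; lines before the first header are dropped."""
--     if not lines:
--         return []
--     if not lines[0].startswith('diff --git'):
--         return _blocks(lines[1:])
--     n = 1
--     while n < len(lines) and not lines[n].startswith('diff --git'):
--         n += 1
--     return [lines[:n]] + _blocks(lines[n:])
--
--
-- def extract_file_diff(diff_content: str, target_file: str) -> str:
--     """Extract diff for a specific file from the full diff."""
--     if not diff_content:
--         return ''
--     blocks = _blocks(diff_content.split('\n'))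
--     kept = [ln for b in blocks if target_file in b[0] for ln in b]
--     return '\n'.join(kept)
-- ===== Notes on version B (the rewrite author's own statement) =====
-- stated objective: alternative
-- what changed: Replaced the single stateful-flag line scan (with its dead break) by a two-phase decomposition: recursively group the lines into per-file blocks at each 'diff --git' header, then filter blocks whose header contains target_file and flatten.
import Mathlib
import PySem

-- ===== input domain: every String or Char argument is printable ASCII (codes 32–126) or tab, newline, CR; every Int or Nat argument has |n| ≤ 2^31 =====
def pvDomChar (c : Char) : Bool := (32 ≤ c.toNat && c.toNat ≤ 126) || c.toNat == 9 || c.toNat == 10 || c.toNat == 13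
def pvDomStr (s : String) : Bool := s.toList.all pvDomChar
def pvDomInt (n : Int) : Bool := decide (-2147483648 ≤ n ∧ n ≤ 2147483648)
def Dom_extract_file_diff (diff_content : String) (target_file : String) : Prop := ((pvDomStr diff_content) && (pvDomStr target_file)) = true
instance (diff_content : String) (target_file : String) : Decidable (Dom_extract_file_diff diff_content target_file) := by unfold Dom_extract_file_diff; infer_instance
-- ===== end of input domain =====

-- B replaces A's single stateful-flag line scan by a two-phase decomposition (group lines
-- into per-file blocks, then filter blocks by header and flatten); objective: alternative.

-- ===== PORT A =====
-- line.startswith('diff --git'), shared literal test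
def hdr (s : String) : Bool := PySem.Str.startswith s "diff --git"

-- the for-loop with its in_target_file flag and (dead) break, as structural recursion
def loopA (tgt : String) : List String → Bool → List String
  | [], _ => []
  | l :: rest, flag =>
    if hdr l then
      let f := PySem.Str.isIn tgt l
      if f then l :: loopA tgt rest f else loopA tgt rest f
    else if flag then
      -- result.append(line); then 'if line.startswith("diff --git"): break'
      if hdr l then [l] else l :: loopA tgt rest flag
    else loopA tgt rest flag

def extract_file_diff (diff_content : String) (target_file : String) : String :=
  if diff_content = "" then ""
  else PySem.Str.join "\n" (loopA target_file ((PySem.Str.split? diff_content "\n").getD []) false)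

-- ===== PORT B =====
-- B's own header test (line.startswith('diff --git'))
def isHeaderB (s : String) : Bool := PySem.Str.startswith s "diff --git"

-- _blocks: drop preamble, cut a block at each 'diff --git' header (the while loop counting
-- non-header lines is takeWhile/dropWhile)
def blocksB : List String → List (List String)
  | [] => []
  | l :: rest =>
    if isHeaderB l then
      (l :: rest.takeWhile (fun x => !isHeaderB x)) ::
        blocksB (rest.dropWhile (fun x => !isHeaderB x))
    else blocksB rest
termination_by xs => xs.length
decreasing_by
  · exact Nat.lt_succ_of_le (List.length_dropWhile_le _ _)
  · exact Nat.lt_succ_self _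

def extract_file_diff_alt (diff_content : String) (target_file : String) : String :=
  if diff_content = "" then ""
  else
    let blocks := blocksB ((PySem.Str.split? diff_content "\n").getD [])
    let kept := (blocks.filter (fun b => PySem.Str.isIn target_file (b.headD ""))).flatMap id
    PySem.Str.join "\n" kept

-- ===== PRECONDITION & SPEC =====
def Spec_extract_file_diff (diff_content : String) (target_file : String) (out : String) : Prop := out = extract_file_diff_alt diff_content target_file
instance (diff_content : String) (target_file : String) (out : String) : Decidable (Spec_extract_file_diff diff_content target_file out) := by unfold Spec_extract_file_diff; infer_instance

-- ===== CLAIM (what is proved, stated in full; the proofs are below) =====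
def Claim_equal_extract_file_diff : Prop := ∀ (diff_content : String) (target_file : String), Dom_extract_file_diff diff_content target_file → Spec_extract_file_diff diff_content target_file (extract_file_diff diff_content target_file)

-- ===== LEMMAS AND PROOFS =====

@[simp] theorem isHeaderB_eq_hdr (s : String) : isHeaderB s = hdr s := rfl

-- with flag=false the scan skips non-header lines
theorem loopA_false_dropWhile (tgt : String) (xs : List String) :
    loopA tgt xs false
      = loopA tgt (xs.dropWhile (fun x => !hdr x)) false := by
  induction xs with
  | nil => rfl
  | cons l rest ih =>
    by_cases h : hdr l
    · simp [List.dropWhile, h]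
    · simp [loopA, List.dropWhile, h, ih]

-- with flag=true the scan emits lines until the next header, then continues flag-agnostically
theorem loopA_true_takeWhile (tgt : String) (xs : List String) :
    loopA tgt xs true
      = xs.takeWhile (fun x => !hdr x)
        ++ loopA tgt (xs.dropWhile (fun x => !hdr x)) false := by
  induction xs with
  | nil => rfl
  | cons l rest ih =>
    by_cases h : hdr l
    · simp [loopA, List.takeWhile, List.dropWhile, h]
    · simp [loopA, List.takeWhile, List.dropWhile, h, ih]

-- main: the flag scan equals "group into blocks, filter by header, flatten"
theorem loopA_eq_blocks (tgt : String) (xs : List String) :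
    loopA tgt xs false
      = ((blocksB xs).filter (fun b => PySem.Str.isIn tgt (b.headD ""))).flatMap id := by
  induction xs using blocksB.induct with
  | case1 => simp [loopA, blocksB]
  | case2 l rest h ih =>
    simp only [isHeaderB_eq_hdr] at h ih
    by_cases hin : PySem.Chars.isIn tgt.toList l.toList = true
    · simp [loopA, blocksB, h, hin, loopA_true_takeWhile, ih]
    · simp [loopA, blocksB, h, hin, loopA_false_dropWhile tgt rest, ih]
  | case3 l rest h ih =>
    simp only [isHeaderB_eq_hdr] at h ih
    simp [loopA, blocksB, h, ih]

-- ===== VERDICT (by name: the statement is the Claim_ definition above) =====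
theorem extract_file_diff_spec : Claim_equal_extract_file_diff := by
  intro dc tf _
  unfold Spec_extract_file_diff extract_file_diff extract_file_diff_alt
  by_cases h : dc = ""
  · simp [h]
  · simp [h, loopA_eq_blocks]
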